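-- pv_equiv track=rewrite | github.com/vicubso/advent-of-code-2023 | day-7/day-7.py | substitute_jacks
-- ===== SOURCE A (Python) =====
-- import itertools
--
-- def substitute_jacks(h):
--     # If a hand contains jacks, replace them with every possible card, and return a list of hands
--     # E.g., "J9J3A" -> ["2923A", "3923A", ... , "A9A3A"]
--     jacks = [i for i, x in enumerate(h) if x == "J"]
--     n_jacks = len(jacks)
--     # generate all possible combinations of cards to replace the jacks
--     replacements = ["".join(x) for x in itertools.product("23456789TQKA", repeat=n_jacks)]
--     hands = [h]*len(replacements)
--     for i in range(len(replacements)):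
--         for j in range(n_jacks):
--             hands[i] = hands[i][:jacks[j]] + replacements[i][j] + hands[i][jacks[j]+1:]
--     return hands
-- ===== SOURCE B (Python) =====
-- def substitute_jacks(h):
--     # Single right-to-left pass with an accumulator of completed tails:
--     # a 'J' fans the current tails out over all twelve cards (card is the
--     # outer loop, so the leftmost jack varies slowest); any other character
--     # is prepended to every tail.
--     hands = [""]
--     for ch in reversed(h):
--         if ch == "J":
--             hands = [c + t for c in "23456789TQKA" for t in hands]
--         else:
--             hands = [ch + t for t in hands]
--     return hands
-- ===== Notes on version B (the rewrite author's own statement) =====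
-- stated objective: simpler
-- what changed: Replaces A's itertools.product enumeration plus nested index loops doing slice-surgery at precomputed jack positions by a single right-to-left pass with an accumulator of completed tails: a jack fans the tails out over the twelve cards, any other character is prepended to each tail.
import Mathlib
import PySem

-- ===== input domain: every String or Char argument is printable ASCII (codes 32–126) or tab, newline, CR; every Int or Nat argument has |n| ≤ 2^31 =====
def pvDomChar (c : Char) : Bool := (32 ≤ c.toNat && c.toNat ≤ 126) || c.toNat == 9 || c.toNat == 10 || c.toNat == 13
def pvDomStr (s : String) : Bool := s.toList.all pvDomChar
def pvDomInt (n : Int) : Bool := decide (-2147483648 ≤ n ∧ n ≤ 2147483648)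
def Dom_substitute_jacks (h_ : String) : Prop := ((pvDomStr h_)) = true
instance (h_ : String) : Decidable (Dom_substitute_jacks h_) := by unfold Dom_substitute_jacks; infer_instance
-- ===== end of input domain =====

-- B replaces A's itertools.product + positional slice-surgery loops by one right-to-left
-- pass over the string with an accumulator of completed tails (objective: simpler; same
-- output, same order).

-- ===== PORT A =====

def pvCards : List Char := "23456789TQKA".toList

-- [i for i, x in enumerate(h) if x == "J"]  (index accumulator mirrors enumerate)
def pvJacksAux : Nat → List Char → List Nat
  | _, [] => []
  | i, c :: t => if c = 'J' then i :: pvJacksAux (i + 1) t else pvJacksAux (i + 1) t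

-- itertools.product("23456789TQKA", repeat=n): first coordinate varies slowest
def pvProdReps : Nat → List (List Char)
  | 0 => [[]]
  | n + 1 => pvCards.flatMap (fun c => (pvProdReps n).map (c :: ·))

def substitute_jacks (h_ : String) : List String :=
  let l := h_.toList
  let jacks := pvJacksAux 0 l
  let reps := pvProdReps jacks.length
  -- hands = [h]*len(replacements); the two index loops: each hands[i] is rewritten by the
  -- inner loop over j in range(n_jacks); h[:k] / h[k+1:] with k = jacks[j] ≥ 0 are exactly
  -- take k / drop (k+1); jacks[j], replacements[i][j] are always in range (getD defaults unused)
  reps.map (fun r => String.ofList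
    ((List.range jacks.length).foldl
      (fun hand j =>
        hand.take (jacks.getD j 0) ++ [r.getD j 'J'] ++ hand.drop (jacks.getD j 0 + 1)) l))

-- ===== PORT B =====

-- one pass over reversed(h): a 'J' fans the tails out over all twelve cards (outer loop);
-- string prepend ch + t is cons on the character list, joined to a String at the end
def substitute_jacks_alt (h_ : String) : List String :=
  (h_.toList.reverse.foldl
    (fun hands ch =>
      if ch = 'J' then pvCards.flatMap (fun c => hands.map (c :: ·))
      else hands.map (ch :: ·)) [[]]).map String.ofList

-- ===== PRECONDITION & SPEC =====
def Spec_substitute_jacks (h_ : String) (out : List String) : Prop := out = substitute_jacks_alt h_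
instance (h_ : String) (out : List String) : Decidable (Spec_substitute_jacks h_ out) := by unfold Spec_substitute_jacks; infer_instance

-- ===== CLAIM (what is proved, stated in full; the proofs are below) =====
def Claim_equal_substitute_jacks : Prop := ∀ (h_ : String), Dom_substitute_jacks h_ → Spec_substitute_jacks h_ (substitute_jacks h_)

-- ===== LEMMAS AND PROOFS =====

-- recursive characterisation of B's fold (and of A's result)
def pvAltL : List Char → List (List Char)
  | [] => [[]]
  | c :: t =>
    if c = 'J' then pvCards.flatMap (fun d => (pvAltL t).map (d :: ·))
    else (pvAltL t).map (c :: ·)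

lemma pvAlt_fold_eq (l : List Char) :
    l.reverse.foldl
      (fun hands ch =>
        if ch = 'J' then pvCards.flatMap (fun c => hands.map (c :: ·))
        else hands.map (ch :: ·)) [[]] = pvAltL l := by
  rw [List.foldl_reverse]
  induction l with
  | nil => simp [pvAltL]
  | cons c t ih => simp [pvAltL, ih]

-- structural form of A's inner index loop
def pvRepl : List Char → List Nat → List Char → List Char
  | h, [], _ => h
  | h, k :: ks, r => pvRepl (h.take k ++ [r.getD 0 'J'] ++ h.drop (k + 1)) ks r.tail

lemma pvGetD_succ (r : List Char) (j : Nat) (d : Char) :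
    r.getD (j + 1) d = r.tail.getD j d := by cases r <;> simp

lemma pvFoldl_range_eq_repl (jacks : List Nat) :
    ∀ (r h : List Char),
      (List.range jacks.length).foldl
        (fun hand j =>
          hand.take (jacks.getD j 0) ++ [r.getD j 'J'] ++ hand.drop (jacks.getD j 0 + 1)) h
      = pvRepl h jacks r := by
  induction jacks with
  | nil => intro r h; simp [pvRepl]
  | cons k ks ih =>
    intro r h
    rw [List.length_cons, List.range_succ_eq_map, List.foldl_cons, List.foldl_map]
    simp only [List.getD_cons_succ, List.getD_cons_zero, pvGetD_succ]
    have := ih r.tail (h.take k ++ [r.getD 0 'J'] ++ h.drop (k + 1))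
    simpa [pvRepl] using this

lemma pvJacksAux_shift (t : List Char) : ∀ i, pvJacksAux (i + 1) t = (pvJacksAux i t).map (· + 1) := by
  induction t with
  | nil => intro i; simp [pvJacksAux]
  | cons c t ih =>
    intro i
    by_cases hc : c = 'J' <;> simp [pvJacksAux, hc, ih]

lemma pvRepl_shift (ks : List Nat) :
    ∀ (r h : List Char) (c : Char), pvRepl (c :: h) (ks.map (· + 1)) r = c :: pvRepl h ks r := by
  induction ks with
  | nil => intro r h c; simp [pvRepl]
  | cons k ks ih =>
    intro r h c
    simp [pvRepl, ih, List.take_succ_cons, List.drop_succ_cons]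

lemma pvMain (l : List Char) :
    (pvProdReps (pvJacksAux 0 l).length).map (fun r => pvRepl l (pvJacksAux 0 l) r)
      = pvAltL l := by
  induction l with
  | nil => simp [pvJacksAux, pvProdReps, pvRepl, pvAltL]
  | cons c t ih =>
    by_cases hc : c = 'J'
    · subst hc
      rw [show pvJacksAux 0 ('J' :: t) = 0 :: (pvJacksAux 0 t).map (· + 1) from by
        simp [pvJacksAux, pvJacksAux_shift]]
      rw [List.length_cons, List.length_map, pvProdReps, List.map_flatMap,
        show pvAltL ('J' :: t) = pvCards.flatMap (fun d => (pvAltL t).map (d :: ·)) from by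
          simp [pvAltL]]
      refine List.flatMap_congr (fun d _ => ?_)
      rw [← ih, List.map_map, List.map_map]
      refine List.map_congr_left (fun r _ => ?_)
      simp [pvRepl, pvRepl_shift]
    · rw [show pvJacksAux 0 (c :: t) = (pvJacksAux 0 t).map (· + 1) from by
        simp [pvJacksAux, hc, pvJacksAux_shift],
        show pvAltL (c :: t) = (pvAltL t).map (c :: ·) from by simp [pvAltL, hc]]
      rw [List.length_map, ← ih, List.map_map]
      refine List.map_congr_left (fun r _ => ?_)
      simp [pvRepl_shift]

-- ===== VERDICT (by name: the statement is the Claim_ definition above) =====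
theorem substitute_jacks_spec : Claim_equal_substitute_jacks := by
  intro h _
  unfold Spec_substitute_jacks substitute_jacks substitute_jacks_alt
  simp only [pvFoldl_range_eq_repl]
  rw [pvAlt_fold_eq, ← pvMain h.toList, List.map_map]
  rfl
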